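-- pv_equiv track=rewrite | github.com/warfair1337/diceroller | dicegui.py | analyze_dice_for_color_map
-- ===== SOURCE A (Python) =====
-- def analyze_dice_for_color_map(dice):
--     """
--     Given the dice list (label, value), determine if we have Quads, Trips, or Dubs
--     and return a color_map: label -> color-string or "" if no color.
--     Also returns any achievement message (e.g. "You got Dubs!").
--     """
--     color_map = {label: "" for (label, _) in dice}
--
--     # Identify values for special labels
--     z_val = y_val = x_val = w_val = None
--     for (label, val) in dice:
--         if label == 'Z':
--             z_val = val
--         elif label == 'Y':
--             y_val = val
--         elif label == 'X':
--             x_val = val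
--         elif label == 'W':
--             w_val = val
--
--     achieved_msg = None
--
--     # QUADS
--     if (z_val is not None and y_val is not None and x_val is not None and w_val is not None
--         and z_val == y_val == x_val == w_val):
--         achieved_msg = "You got Quads!"
--         for lbl in ['Z', 'Y', 'X', 'W']:
--             color_map[lbl] = "blue"
--
--     # TRIPS
--     elif (z_val is not None and y_val is not None and x_val is not None
--           and z_val == y_val == x_val):
--         achieved_msg = "You got Trips!"
--         for lbl in ['Z', 'Y', 'X']:
--             color_map[lbl] = "red"
--
--     # DUBS
--     elif (z_val is not None and y_val is not None
--           and z_val == y_val):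
--         achieved_msg = "You got Dubs!"
--         for lbl in ['Z', 'Y']:
--             color_map[lbl] = "green"
--
--     return color_map, achieved_msg
-- ===== SOURCE B (Python) =====
-- def analyze_dice_for_color_map(dice):
--     """
--     Same contract as A: color_map label -> color-string ("" if none), plus an
--     achievement message. Uses a value dict and a single match-run length over
--     the ordered labels instead of four tiered guard expressions.
--     """
--     color_map = dict.fromkeys((label for label, _ in dice), "")
--     d = {label: val for label, val in dice}
--
--     # n = length of the leading prefix of ['Z','Y','X','W'] whose labels are
--     # present and whose values equal d['Z'].
--     n = 0
--     for lbl in ['Z', 'Y', 'X', 'W']: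
--         if lbl in d and d[lbl] == d['Z']:
--             n += 1
--         else:
--             break
--
--     if n >= 4:
--         msg = "You got Quads!"
--         for lbl in ['Z', 'Y', 'X', 'W']:
--             color_map[lbl] = "blue"
--     elif n == 3:
--         msg = "You got Trips!"
--         for lbl in ['Z', 'Y', 'X']:
--             color_map[lbl] = "red"
--     elif n == 2:
--         msg = "You got Dubs!"
--         for lbl in ['Z', 'Y']:
--             color_map[lbl] = "green"
--     else:
--         msg = None
--     return color_map, msg
-- ===== Notes on version B (the rewrite author's own statement) =====
-- stated objective: alternative
-- what changed: Replaces the four separate Optional value variables and the three tiered multi-way equality guards with a label->value dict and a single match-run length n over the ordered labels ['Z','Y','X','W'], dispatching once on n.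
import Mathlib
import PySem

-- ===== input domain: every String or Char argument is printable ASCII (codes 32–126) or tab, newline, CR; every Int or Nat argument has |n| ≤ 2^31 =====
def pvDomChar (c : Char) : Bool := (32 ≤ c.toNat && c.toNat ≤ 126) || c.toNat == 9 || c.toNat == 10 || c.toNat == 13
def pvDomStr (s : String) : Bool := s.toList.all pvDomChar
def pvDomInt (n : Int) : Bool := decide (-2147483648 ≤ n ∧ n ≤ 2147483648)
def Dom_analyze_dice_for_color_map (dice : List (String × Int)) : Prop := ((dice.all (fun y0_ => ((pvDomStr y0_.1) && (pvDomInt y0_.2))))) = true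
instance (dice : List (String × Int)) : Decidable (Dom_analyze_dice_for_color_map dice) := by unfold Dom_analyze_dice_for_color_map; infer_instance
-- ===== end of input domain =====

-- B replaces A's four Optional value variables and tiered multi-equality guards by a
-- label->value dict and a single match-run length over ['Z','Y','X','W'] (objective: alternative).


-- ===== PORT A =====
-- state (z_val, y_val, x_val, w_val), updated exactly as A's elif chain does
def pvStepA (s : Option Int × Option Int × Option Int × Option Int) (p : String × Int) :
    Option Int × Option Int × Option Int × Option Int :=
  if p.1 == "Z" then (some p.2, s.2.1, s.2.2.1, s.2.2.2)
  else if p.1 == "Y" then (s.1, some p.2, s.2.2.1, s.2.2.2)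
  else if p.1 == "X" then (s.1, s.2.1, some p.2, s.2.2.2)
  else if p.1 == "W" then (s.1, s.2.1, s.2.2.1, some p.2)
  else s

def analyze_dice_for_color_map (dice : List (String × Int)) : (List (String × String)) × Option String :=
  let color_map : PySem.Dict String String :=
    dice.foldl (fun d p => d.insert p.1 "") PySem.Dict.empty
  let st := dice.foldl pvStepA (none, none, none, none)
  let z := st.1; let y := st.2.1; let x := st.2.2.1; let w := st.2.2.2
  if z.isSome && y.isSome && x.isSome && w.isSome && z == y && y == x && x == w then
    ((["Z", "Y", "X", "W"].foldl (fun d l => d.insert l "blue") color_map).items,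
     some "You got Quads!")
  else if z.isSome && y.isSome && x.isSome && z == y && y == x then
    ((["Z", "Y", "X"].foldl (fun d l => d.insert l "red") color_map).items,
     some "You got Trips!")
  else if z.isSome && y.isSome && z == y then
    ((["Z", "Y"].foldl (fun d l => d.insert l "green") color_map).items,
     some "You got Dubs!")
  else (color_map.items, none)

-- ===== PORT B =====
-- n over the remaining label list: present and equal to d['Z'] extends the run, else break
def pvRunLen (d : PySem.Dict String Int) : List String → Nat
  | [] => 0
  | l :: ls => if d.contains l && d.get? l == d.get? "Z" then pvRunLen d ls + 1 else 0

def analyze_dice_for_color_map_alt (dice : List (String × Int)) : (List (String × String)) × Option String :=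
  let color_map : PySem.Dict String String :=
    dice.foldl (fun d p => d.insert p.1 "") PySem.Dict.empty
  let d : PySem.Dict String Int :=
    dice.foldl (fun m p => m.insert p.1 p.2) PySem.Dict.empty
  let n := pvRunLen d ["Z", "Y", "X", "W"]
  if 4 ≤ n then
    ((["Z", "Y", "X", "W"].foldl (fun d l => d.insert l "blue") color_map).items,
     some "You got Quads!")
  else if n = 3 then
    ((["Z", "Y", "X"].foldl (fun d l => d.insert l "red") color_map).items,
     some "You got Trips!")
  else if n = 2 then
    ((["Z", "Y"].foldl (fun d l => d.insert l "green") color_map).items,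
     some "You got Dubs!")
  else (color_map.items, none)

-- ===== PRECONDITION & SPEC =====
def Spec_analyze_dice_for_color_map (dice : List (String × Int)) (out : (List (String × String)) × Option String) : Prop := out = analyze_dice_for_color_map_alt dice
instance (dice : List (String × Int)) (out : (List (String × String)) × Option String) : Decidable (Spec_analyze_dice_for_color_map dice out) := by unfold Spec_analyze_dice_for_color_map; infer_instance

-- ===== CLAIM (what is proved, stated in full; the proofs are below) =====
def Claim_equal_analyze_dice_for_color_map : Prop := ∀ (dice : List (String × Int)), Dom_analyze_dice_for_color_map dice → Spec_analyze_dice_for_color_map dice (analyze_dice_for_color_map dice)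

-- ===== LEMMAS AND PROOFS =====

-- A's four scanning variables are exactly the last-wins lookups in B's value dict
theorem pvFold_eq_lookups (dice : List (String × Int)) (s : Option Int × Option Int × Option Int × Option Int)
    (m : PySem.Dict String Int)
    (h : s = (m.get? "Z", m.get? "Y", m.get? "X", m.get? "W")) :
    dice.foldl pvStepA s =
      ((dice.foldl (fun m p => m.insert p.1 p.2) m).get? "Z",
       (dice.foldl (fun m p => m.insert p.1 p.2) m).get? "Y",
       (dice.foldl (fun m p => m.insert p.1 p.2) m).get? "X",
       (dice.foldl (fun m p => m.insert p.1 p.2) m).get? "W") := by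
  induction dice generalizing s m with
  | nil => simpa using h
  | cons p rest ih =>
    simp only [List.foldl_cons]
    refine ih _ _ ?_
    subst h
    simp only [pvStepA, PySem.Dict.get?_insert]
    by_cases hz : p.1 = "Z"
    · simp [hz]
    by_cases hy : p.1 = "Y"
    · simp [hy]
    by_cases hx : p.1 = "X"
    · simp [hx]
    by_cases hw : p.1 = "W"
    · simp [hw]
    simp [hz, hy, hx, hw, Ne.symm hz, Ne.symm hy, Ne.symm hx, Ne.symm hw]

-- B's runlen over the four literal labels, written as nested ifs on lookups
theorem pvRunLen_four (d : PySem.Dict String Int) :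
    pvRunLen d ["Z", "Y", "X", "W"] =
      (if (d.get? "Z").isSome then
        (if (d.get? "Y").isSome && (d.get? "Y" == d.get? "Z") then
          (if (d.get? "X").isSome && (d.get? "X" == d.get? "Z") then
            (if (d.get? "W").isSome && (d.get? "W" == d.get? "Z") then 4 else 3) else 2) else 1)
       else 0) := by
  simp only [pvRunLen, PySem.Dict.contains_eq_isSome_get?]
  rcases d.get? "Z" with _ | zv
  · simp
  · simp
    split_ifs <;> rfl

-- tiered guards and run-length dispatch pick the same branch, for abstract branch results
set_option maxRecDepth 8192 in
set_option maxHeartbeats 2000000 in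
theorem pvKey {α : Type} (z y x w : Option Int) (Q T Du O : α) :
    (if z.isSome && y.isSome && x.isSome && w.isSome && z == y && y == x && x == w then Q
     else if z.isSome && y.isSome && x.isSome && z == y && y == x then T
     else if z.isSome && y.isSome && z == y then Du else O)
    =
    (if 4 ≤ (if z.isSome then
              (if y.isSome && (y == z) then
                (if x.isSome && (x == z) then
                  (if w.isSome && (w == z) then 4 else 3) else 2) else 1)
             else (0 : Nat)) then Q
     else if (if z.isSome then
              (if y.isSome && (y == z) then
                (if x.isSome && (x == z) then
                  (if w.isSome && (w == z) then 4 else 3) else 2) else 1)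
             else (0 : Nat)) = 3 then T
     else if (if z.isSome then
              (if y.isSome && (y == z) then
                (if x.isSome && (x == z) then
                  (if w.isSome && (w == z) then 4 else 3) else 2) else 1)
             else (0 : Nat)) = 2 then Du
     else O) := by
  rcases z with _ | zv <;> rcases y with _ | yv <;> rcases x with _ | xv <;> rcases w with _ | wv <;>
    split_ifs <;> simp_all

-- ===== VERDICT (by name: the statement is the Claim_ definition above) =====
theorem analyze_dice_for_color_map_spec : Claim_equal_analyze_dice_for_color_map := by
  intro dice _
  unfold Spec_analyze_dice_for_color_map analyze_dice_for_color_map analyze_dice_for_color_map_alt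
  have hst := pvFold_eq_lookups dice (none, none, none, none) PySem.Dict.empty (by simp)
  simp only [hst, pvRunLen_four]
  exact pvKey _ _ _ _ _ _ _ _
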